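-- pv_equiv track=rewrite | github.com/raphschlatt/ads-bib | src/ads_bib/translate.py | _merge_translated_chunks
-- ===== SOURCE A (Python) =====
-- def _merge_translated_chunks(chunks: list[str]) -> str:
--     """Merge chunk translations while trimming simple duplicated overlap text."""
--     if not chunks:
--         return ""
--     merged = chunks[0].strip()
--     for chunk in chunks[1:]:
--         current = chunk.strip()
--         if not current:
--             continue
--         prev_words = merged.split()
--         next_words = current.split()
--         overlap = 0
--         max_overlap = min(24, len(prev_words), len(next_words))
--         if max_overlap > 0:
--             prev_fold = [w.casefold() for w in prev_words]
--             next_fold = [w.casefold() for w in next_words]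
--             for n in range(max_overlap, 0, -1):
--                 if prev_fold[-n:] == next_fold[:n]:
--                     overlap = n
--                     break
--         if overlap:
--             next_words = next_words[overlap:]
--         if next_words:
--             merged = f"{merged} {' '.join(next_words)}".strip()
--     return merged.strip()
-- ===== SOURCE B (Python) =====
-- def _merge_translated_chunks(chunks: list[str]) -> str:
--     """Merge chunk translations, trimming duplicated word overlap.
--
--     Single pass: keeps the running casefolded word list and collects the
--     appended words, joining them once at the end instead of re-splitting
--     the whole merged text for every chunk.
--     """
--     if not chunks:
--         return ""
--     base = chunks[0].strip()
--     fold = [w.casefold() for w in base.split()]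
--     extra: list[str] = []
--     for chunk in chunks[1:]:
--         next_words = chunk.split()
--         if not next_words:
--             continue
--         next_fold = [w.casefold() for w in next_words]
--         overlap = 0
--         for n in range(min(24, len(fold), len(next_words)), 0, -1):
--             if fold[-n:] == next_fold[:n]:
--                 overlap = n
--                 break
--         add = next_words[overlap:]
--         if add:
--             extra.extend(add)
--             fold.extend(next_fold[overlap:])
--     if not extra:
--         return base
--     if not base:
--         return " ".join(extra)
--     return base + " " + " ".join(extra)
-- ===== Notes on version B (the rewrite author's own statement) =====
-- stated objective: faster
-- what changed: Instead of re-splitting the entire merged string on every chunk and re-joining it into a growing string, B keeps the running casefolded word list and accumulates the appended words, doing a single final join; only the last <=24 folded words are ever compared.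
import Mathlib
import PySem

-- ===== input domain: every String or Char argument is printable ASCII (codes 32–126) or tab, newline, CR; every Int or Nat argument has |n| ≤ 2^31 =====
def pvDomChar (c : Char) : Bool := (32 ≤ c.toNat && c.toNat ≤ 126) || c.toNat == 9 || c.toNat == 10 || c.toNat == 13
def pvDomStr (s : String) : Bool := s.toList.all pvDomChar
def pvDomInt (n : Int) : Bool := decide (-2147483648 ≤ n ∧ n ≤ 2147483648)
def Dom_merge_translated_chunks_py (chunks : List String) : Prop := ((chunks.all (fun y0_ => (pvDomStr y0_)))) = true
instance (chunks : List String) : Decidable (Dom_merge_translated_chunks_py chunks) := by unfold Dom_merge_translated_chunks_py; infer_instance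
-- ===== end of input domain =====

-- B avoids re-splitting the whole merged text per chunk: it keeps the running casefolded
-- word list and collects appended words for one final join (objective: faster).


-- ===== PORT A =====
-- `for n in range(max_overlap, 0, -1): if prev_fold[-n:] == next_fold[:n]: overlap = n; break`
-- (the countdown break-loop, returning 0 when no n matches)
def findOverlapA (prevFold nextFold : List String) : Nat → Nat
  | 0 => 0
  | n + 1 =>
      if PySem.List.slice prevFold (some (-((n + 1 : Nat) : Int))) none
           = PySem.List.slice nextFold none (some ((n + 1 : Nat) : Int)) then n + 1
      else findOverlapA prevFold nextFold n

-- the body of `for chunk in chunks[1:]` (str.casefold is PySem.Str.lower: exact on the ASCII domain)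
def stepA (merged chunk : String) : String :=
  let current := PySem.Str.strip chunk
  if current = "" then merged
  else
    let prev_words := PySem.Str.split₀ merged
    let next_words := PySem.Str.split₀ current
    let max_overlap := min 24 (min prev_words.length next_words.length)
    let prev_fold := prev_words.map PySem.Str.lower
    let next_fold := next_words.map PySem.Str.lower
    let overlap := findOverlapA prev_fold next_fold max_overlap
    let next_words :=
      if overlap ≠ 0 then PySem.List.slice next_words (some (overlap : Int)) none else next_words
    if next_words ≠ [] then
      -- f"{merged} {' '.join(next_words)}".strip(): exact concatenation on the code points
      PySem.Str.strip (String.ofList (merged.toList ++ ' ' :: (PySem.Str.join " " next_words).toList))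
    else merged

def merge_translated_chunks_py (chunks : List String) : String :=
  match chunks with
  | [] => ""
  | c0 :: rest => PySem.Str.strip (rest.foldl stepA (PySem.Str.strip c0))

-- ===== PORT B =====
-- the same countdown break-loop, `fold[-n:] == next_fold[:n]`
def findOverlapB (fold nextFold : List String) : Nat → Nat
  | 0 => 0
  | n + 1 =>
      if PySem.List.slice fold (some (-((n + 1 : Nat) : Int))) none
           = PySem.List.slice nextFold none (some ((n + 1 : Nat) : Int)) then n + 1
      else findOverlapB fold nextFold n

-- loop body of B: state is (fold, extra)  (str.casefold is PySem.Str.lower: exact on ASCII)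
def stepB (st : List String × List String) (chunk : String) : List String × List String :=
  let next_words := PySem.Str.split₀ chunk
  if next_words = [] then st
  else
    let next_fold := next_words.map PySem.Str.lower
    let overlap := findOverlapB st.1 next_fold (min 24 (min st.1.length next_words.length))
    let add := PySem.List.slice next_words (some (overlap : Int)) none
    if add = [] then st
    else (st.1 ++ PySem.List.slice next_fold (some (overlap : Int)) none, st.2 ++ add)

def merge_translated_chunks_py_alt (chunks : List String) : String :=
  match chunks with
  | [] => ""
  | c0 :: rest =>
    let base := PySem.Str.strip c0
    let st := rest.foldl stepB ((PySem.Str.split₀ base).map PySem.Str.lower, [])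
    if st.2 = [] then base
    else if base = "" then PySem.Str.join " " st.2
    else String.ofList (base.toList ++ ' ' :: (PySem.Str.join " " st.2).toList)

-- ===== PRECONDITION & SPEC =====
def Spec_merge_translated_chunks_py (chunks : List String) (out : String) : Prop := out = merge_translated_chunks_py_alt chunks
instance (chunks : List String) (out : String) : Decidable (Spec_merge_translated_chunks_py chunks out) := by unfold Spec_merge_translated_chunks_py; infer_instance

-- ===== CLAIM (what is proved, stated in full; the proofs are below) =====
def Claim_equal_merge_translated_chunks_py : Prop := ∀ (chunks : List String), Dom_merge_translated_chunks_py chunks → Spec_merge_translated_chunks_py chunks (merge_translated_chunks_py chunks)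

-- ===== LEMMAS AND PROOFS =====

theorem go_acc (s : List Char) : ∀ (cur : List Char) (acc : List (List Char)),
    PySem.Chars.split₀.go s cur acc = acc.reverse ++ PySem.Chars.split₀.go s cur [] := by
  induction s with
  | nil => intro cur acc; simp [PySem.Chars.split₀.go]; split <;> simp
  | cons c s ih =>
      intro cur acc
      simp only [PySem.Chars.split₀.go]
      split
      · split
        · rw [ih _ acc]
        · rw [ih _ (cur.reverse :: acc), ih _ [cur.reverse]]; simp
      · rw [ih _ acc]

theorem split_cons_space {c : Char} (s : List Char) (h : PySem.Chars.isspace c = true) :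
    PySem.Chars.split₀ (c :: s) = PySem.Chars.split₀ s := by
  simp [PySem.Chars.split₀, PySem.Chars.split₀.go, h]

theorem go_word (s : List Char) : ∀ (cur : List Char), cur ≠ [] →
    PySem.Chars.split₀.go s cur []
      = (cur.reverse ++ s.takeWhile (fun c => !PySem.Chars.isspace c)) :: PySem.Chars.split₀ (s.dropWhile (fun c => !PySem.Chars.isspace c)) := by
  induction s with
  | nil => intro cur h; simp [PySem.Chars.split₀.go, PySem.Chars.split₀, h]
  | cons c s ih =>
      intro cur h
      simp only [PySem.Chars.split₀.go]
      by_cases hc : PySem.Chars.isspace c = true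
      · rw [if_pos hc, if_neg (by simpa using h), go_acc, List.takeWhile_cons, List.dropWhile_cons]
        simp only [hc]
        simp [PySem.Chars.split₀]
        simp [PySem.Chars.split₀.go, hc]
      · rw [if_neg (by simp [hc]), List.takeWhile_cons, List.dropWhile_cons]
        rw [ih (c :: cur) (by simp)]
        simp [hc]

theorem split_cons_word {c : Char} (s : List Char) (h : PySem.Chars.isspace c = false) :
    PySem.Chars.split₀ (c :: s)
      = (c :: s.takeWhile (fun c => !PySem.Chars.isspace c)) :: PySem.Chars.split₀ (s.dropWhile (fun c => !PySem.Chars.isspace c)) := by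
  have : PySem.Chars.split₀ (c :: s) = PySem.Chars.split₀.go s [c] [] := by
    simp [PySem.Chars.split₀, PySem.Chars.split₀.go, h]
  rw [this, go_word s [c] (by simp)]
  rfl

-- a maximal run of non-space characters is a word
def IsWordL (w : List Char) : Prop := w ≠ [] ∧ ∀ c ∈ w, PySem.Chars.isspace c = false

theorem split_nil : PySem.Chars.split₀ [] = [] := rfl

theorem split_allspace {t : List Char} (h : ∀ c ∈ t, PySem.Chars.isspace c = true) :
    PySem.Chars.split₀ t = [] := by
  induction t with
  | nil => rfl
  | cons c t ih =>
      rw [split_cons_space t (h c (by simp))]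
      exact ih (fun c hc => h c (List.mem_cons_of_mem _ hc))

theorem split_append_space_aux : ∀ (n : ℕ) (a : List Char), a.length ≤ n → ∀ {c : Char} (b : List Char),
    PySem.Chars.isspace c = true →
    PySem.Chars.split₀ (a ++ c :: b) = PySem.Chars.split₀ a ++ PySem.Chars.split₀ b := by
  intro n
  induction n with
  | zero =>
      intro a ha c b hc
      have : a = [] := List.eq_nil_of_length_eq_zero (Nat.le_zero.mp ha)
      subst this
      simp [split_cons_space b hc, split_nil]
  | succ n ih =>
      intro a ha c b hc
      match a with
      | [] => simp [split_cons_space b hc, split_nil]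
      | d :: a' =>
          by_cases hd : PySem.Chars.isspace d = true
          · rw [List.cons_append, split_cons_space _ hd, split_cons_space _ hd]
            exact ih a' (by simpa using Nat.lt_succ_iff.mp (by simpa using ha)) b hc
          · have hd' : PySem.Chars.isspace d = false := by simpa using hd
            rw [List.cons_append, split_cons_word _ hd', split_cons_word _ hd']
            have htake : (a' ++ c :: b).takeWhile (fun x => !PySem.Chars.isspace x)
                = a'.takeWhile (fun x => !PySem.Chars.isspace x) := by
              rw [List.takeWhile_append]
              split
              · next hlen =>
                  have : a'.takeWhile (fun x => !PySem.Chars.isspace x) = a' :=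
                    List.IsPrefix.eq_of_length (List.takeWhile_prefix _) hlen
                  simp [hc, this]
              · rfl
            have hdrop : (a' ++ c :: b).dropWhile (fun x => !PySem.Chars.isspace x)
                = if (a'.dropWhile (fun x => !PySem.Chars.isspace x)).isEmpty
                  then c :: b else a'.dropWhile (fun x => !PySem.Chars.isspace x) ++ c :: b := by
              rw [List.dropWhile_append]
              simp [hc]
            rw [htake, hdrop]
            by_cases he : (a'.dropWhile (fun x => !PySem.Chars.isspace x)).isEmpty
            · simp only [he, if_pos]
              rw [split_cons_space b hc]
              rw [List.isEmpty_iff] at he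
              rw [he, split_nil]
              simp
            · simp only [he, if_neg, Bool.not_eq_true]
              have hlt : (a'.dropWhile (fun x => !PySem.Chars.isspace x)).length ≤ n := by
                have h1 : (a'.dropWhile (fun x => !PySem.Chars.isspace x)).length ≤ a'.length :=
                  List.length_dropWhile_le _ _
                have h2 : a'.length ≤ n := Nat.lt_succ_iff.mp (by simpa using ha)
                omega
              rw [ih _ hlt b hc, List.cons_append]

theorem split_append_space (a : List Char) {c : Char} (b : List Char)
    (hc : PySem.Chars.isspace c = true) :
    PySem.Chars.split₀ (a ++ c :: b) = PySem.Chars.split₀ a ++ PySem.Chars.split₀ b :=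
  split_append_space_aux a.length a le_rfl b hc

theorem split_words_aux : ∀ (n : ℕ) (s : List Char), s.length ≤ n →
    ∀ w ∈ PySem.Chars.split₀ s, IsWordL w := by
  intro n
  induction n with
  | zero =>
      intro s hs
      have : s = [] := List.eq_nil_of_length_eq_zero (Nat.le_zero.mp hs)
      subst this; simp [split_nil]
  | succ n ih =>
      intro s hs w hw
      match s with
      | [] => simp [split_nil] at hw
      | c :: s' =>
          by_cases hc : PySem.Chars.isspace c = true
          · rw [split_cons_space s' hc] at hw
            exact ih s' (Nat.lt_succ_iff.mp (by simpa using hs)) w hw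
          · have hc' : PySem.Chars.isspace c = false := by simpa using hc
            rw [split_cons_word s' hc'] at hw
            rcases List.mem_cons.mp hw with h | h
            · subst h
              refine ⟨by simp, ?_⟩
              intro x hx
              rcases List.mem_cons.mp hx with h | h
              · subst h; exact hc'
              · have := List.mem_takeWhile_imp h
                simpa using this
            · have hlt : (s'.dropWhile (fun x => !PySem.Chars.isspace x)).length ≤ n := by
                have h1 := List.length_dropWhile_le (fun x => !PySem.Chars.isspace x) s'
                have h2 : s'.length ≤ n := Nat.lt_succ_iff.mp (by simpa using hs)
                omega
              exact ih _ hlt w h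

theorem split_words (s : List Char) : ∀ w ∈ PySem.Chars.split₀ s, IsWordL w :=
  split_words_aux s.length s le_rfl

theorem word_split {w : List Char} (h : IsWordL w) : PySem.Chars.split₀ w = [w] := by
  obtain ⟨hne, hall⟩ := h
  match w with
  | [] => exact absurd rfl hne
  | c :: t =>
      rw [split_cons_word t (hall c (by simp))]
      have htake : t.takeWhile (fun x => !PySem.Chars.isspace x) = t :=
        List.takeWhile_eq_self_iff.mpr (fun x hx => by simp [hall x (List.mem_cons_of_mem _ hx)])
      have hdrop : t.dropWhile (fun x => !PySem.Chars.isspace x) = [] :=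
        List.dropWhile_eq_nil_iff.mpr (fun x hx => by simp [hall x (List.mem_cons_of_mem _ hx)])
      rw [htake, hdrop, split_nil]

theorem split_join {ws : List (List Char)} (h : ∀ w ∈ ws, IsWordL w) :
    PySem.Chars.split₀ (PySem.Chars.join [' '] ws) = ws := by
  induction ws with
  | nil => simp [PySem.Chars.join, List.intercalate, split_nil]
  | cons w ws ih =>
      match ws with
      | [] =>
          simp only [PySem.Chars.join, List.intercalate]
          simpa using word_split (h w (by simp))
      | w' :: t =>
          rw [PySem.Chars.join_cons_cons, List.append_assoc]
          have : (' ' :: PySem.Chars.join [' '] (w' :: t) : List Char)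
              = [] ++ ' ' :: PySem.Chars.join [' '] (w' :: t) := rfl
          rw [show ([' '] : List Char) ++ PySem.Chars.join [' '] (w' :: t)
              = ' ' :: PySem.Chars.join [' '] (w' :: t) from rfl]
          rw [split_append_space w (PySem.Chars.join [' '] (w' :: t)) (by decide)]
          rw [word_split (h w (by simp)), ih (fun x hx => h x (List.mem_cons_of_mem _ hx))]
          rfl

theorem split_spaces_prefix {t : List Char} (s : List Char)
    (h : ∀ c ∈ t, PySem.Chars.isspace c = true) :
    PySem.Chars.split₀ (t ++ s) = PySem.Chars.split₀ s := by
  induction t with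
  | nil => rfl
  | cons c t ih =>
      rw [List.cons_append, split_cons_space _ (h c (by simp))]
      exact ih (fun x hx => h x (List.mem_cons_of_mem _ hx))

theorem split_spaces_suffix {t : List Char} (s : List Char)
    (h : ∀ c ∈ t, PySem.Chars.isspace c = true) :
    PySem.Chars.split₀ (s ++ t) = PySem.Chars.split₀ s := by
  match t with
  | [] => simp
  | c :: t' =>
      rw [split_append_space s t' (h c (by simp))]
      rw [split_allspace (fun x hx => h x (List.mem_cons_of_mem _ hx))]
      simp

theorem split_lstrip (s : List Char) :
    PySem.Chars.split₀ (PySem.Chars.lstrip s) = PySem.Chars.split₀ s := by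
  conv_rhs => rw [show s = s.takeWhile PySem.Chars.isspace ++ s.dropWhile PySem.Chars.isspace from
    (List.takeWhile_append_dropWhile).symm]
  rw [split_spaces_prefix _ (fun c hc => List.mem_takeWhile_imp hc)]
  rfl

theorem rstrip_decomp (s : List Char) :
    s = PySem.Chars.rstrip s ++ (s.reverse.takeWhile PySem.Chars.isspace).reverse := by
  conv_lhs => rw [show s = s.reverse.reverse from (List.reverse_reverse s).symm]
  conv_lhs => rw [show s.reverse = s.reverse.takeWhile PySem.Chars.isspace
      ++ s.reverse.dropWhile PySem.Chars.isspace from (List.takeWhile_append_dropWhile).symm]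
  rw [List.reverse_append]
  rfl

theorem split_rstrip (s : List Char) :
    PySem.Chars.split₀ (PySem.Chars.rstrip s) = PySem.Chars.split₀ s := by
  conv_rhs => rw [rstrip_decomp s]
  rw [split_spaces_suffix _ (fun c hc => List.mem_takeWhile_imp (by simpa using hc))]

theorem split_strip (s : List Char) :
    PySem.Chars.split₀ (PySem.Chars.strip s) = PySem.Chars.split₀ s := by
  rw [PySem.Chars.strip, split_rstrip, split_lstrip]

-- clean ends: first and last character (if any) are not whitespace
def CleanEnds (l : List Char) : Prop :=
  (∀ c, l.head? = some c → PySem.Chars.isspace c = false)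
  ∧ (∀ c, l.getLast? = some c → PySem.Chars.isspace c = false)

theorem lstrip_of_clean {l : List Char} (h : ∀ c, l.head? = some c → PySem.Chars.isspace c = false) :
    PySem.Chars.lstrip l = l := by
  match l with
  | [] => rfl
  | c :: t =>
      rw [PySem.Chars.lstrip, List.dropWhile_cons, h c rfl]
      simp

theorem rstrip_of_clean {l : List Char} (h : ∀ c, l.getLast? = some c → PySem.Chars.isspace c = false) :
    PySem.Chars.rstrip l = l := by
  rw [PySem.Chars.rstrip]
  match hl : l.reverse with
  | [] => simpa using congrArg List.reverse hl
  | c :: t =>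
      have hc : l.getLast? = some c := by
        rw [← List.head?_reverse, hl]; rfl
      rw [List.dropWhile_cons, h c hc]
      simp [← hl]

theorem strip_of_clean {l : List Char} (h : CleanEnds l) : PySem.Chars.strip l = l := by
  rw [PySem.Chars.strip, lstrip_of_clean h.1, rstrip_of_clean h.2]

theorem clean_strip (s : List Char) : CleanEnds (PySem.Chars.strip s) := by
  constructor
  · intro c hc
    rw [PySem.Chars.strip] at hc
    have hpre : PySem.Chars.rstrip (PySem.Chars.lstrip s) <+: PySem.Chars.lstrip s := by
      rw [PySem.Chars.rstrip]
      have := List.dropWhile_suffix (l := (PySem.Chars.lstrip s).reverse) (p := PySem.Chars.isspace)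
      have := List.IsSuffix.reverse this
      simpa using this
    obtain ⟨r, hr⟩ := hpre
    have hhead : (PySem.Chars.lstrip s).head? = some c := by
      rw [← hr]
      rw [List.head?_append_of_ne_nil]
      · exact hc
      · intro hnil; rw [hnil] at hc; simp at hc
    have := List.head?_dropWhile_not PySem.Chars.isspace s
    rw [show List.dropWhile PySem.Chars.isspace s = PySem.Chars.lstrip s from rfl, hhead] at this
    simpa using this
  · intro c hc
    rw [PySem.Chars.strip, PySem.Chars.rstrip, ← List.head?_reverse, List.reverse_reverse] at hc
    have := List.head?_dropWhile_not PySem.Chars.isspace (PySem.Chars.lstrip s).reverse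
    rw [hc] at this
    simpa using this

theorem join_ne_nil {ws : List (List Char)} (hne : ws ≠ []) (h : ∀ w ∈ ws, IsWordL w) :
    PySem.Chars.join [' '] ws ≠ [] := by
  match ws with
  | [] => exact absurd rfl hne
  | w :: t =>
      match t with
      | [] =>
          have : PySem.Chars.join [' '] [w] = w := by simp [PySem.Chars.join, List.intercalate]
          rw [this]; exact (h w (by simp)).1
      | w' :: t' =>
          rw [PySem.Chars.join_cons_cons]
          intro hcontra
          have := congrArg List.length hcontra
          simp at this

theorem clean_join {ws : List (List Char)} (h : ∀ w ∈ ws, IsWordL w) :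
    CleanEnds (PySem.Chars.join [' '] ws) := by
  induction ws with
  | nil => exact ⟨by intro c hc; simp [PySem.Chars.join, List.intercalate] at hc,
                 by intro c hc; simp [PySem.Chars.join, List.intercalate] at hc⟩
  | cons w t ih =>
      match t with
      | [] =>
          have hw := h w (by simp)
          have : PySem.Chars.join [' '] [w] = w := by simp [PySem.Chars.join, List.intercalate]
          rw [this]
          exact ⟨fun c hc => hw.2 c (by exact List.mem_of_mem_head? hc),
                 fun c hc => hw.2 c (List.mem_of_mem_getLast? hc)⟩
      | w' :: t' =>
          have ih' := ih (fun x hx => h x (List.mem_cons_of_mem _ hx))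
          have hw := h w (by simp)
          rw [PySem.Chars.join_cons_cons, List.append_assoc]
          constructor
          · intro c hc
            rw [List.head?_append_of_ne_nil _ hw.1] at hc
            exact hw.2 c (List.mem_of_mem_head? hc)
          · intro c hc
            have hne : PySem.Chars.join [' '] (w' :: t') ≠ [] :=
              join_ne_nil (by simp) (fun x hx => h x (List.mem_cons_of_mem _ hx))
            rw [List.getLast?_append_of_ne_nil w (by simp)] at hc
            rw [List.getLast?_append_of_ne_nil [' '] hne] at hc
            exact ih'.2 c hc

theorem join_append {xs ys : List (List Char)} (hx : xs ≠ []) (hy : ys ≠ []) :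
    PySem.Chars.join [' '] (xs ++ ys)
      = PySem.Chars.join [' '] xs ++ ' ' :: PySem.Chars.join [' '] ys := by
  induction xs with
  | nil => exact absurd rfl hx
  | cons w t ih =>
      match t with
      | [] =>
          match ys with
          | [] => exact absurd rfl hy
          | y :: ys' =>
              rw [show ([w] ++ y :: ys') = w :: y :: ys' from rfl, PySem.Chars.join_cons_cons]
              simp [PySem.Chars.join, List.intercalate]
      | w' :: t' =>
          rw [show ((w :: w' :: t') ++ ys) = w :: w' :: (t' ++ ys) from by simp]
          rw [PySem.Chars.join_cons_cons]
          rw [← List.cons_append (a := w') (as := t') (bs := ys), ih (by simp), PySem.Chars.join_cons_cons]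
          simp

theorem split_eq_nil_iff_strip_eq_nil (s : List Char) :
    PySem.Chars.split₀ s = [] ↔ PySem.Chars.strip s = [] := by
  constructor
  · intro h
    by_contra hne
    match hl : PySem.Chars.strip s with
    | [] => exact hne hl
    | c :: t =>
        have hclean := clean_strip s
        rw [hl] at hclean
        have hc : PySem.Chars.isspace c = false := hclean.1 c rfl
        have := split_strip s
        rw [hl, split_cons_word t hc, h] at this
        simp at this
  · intro h
    rw [← split_strip, h, split_nil]

theorem strip_append_word {M j : List Char} (hM : CleanEnds M) (hj : CleanEnds j) (hjne : j ≠ []) :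
    PySem.Chars.strip (M ++ ' ' :: j) = if M = [] then j else M ++ ' ' :: j := by
  by_cases hMnil : M = []
  · subst hMnil
    have h1 : PySem.Chars.strip (' ' :: j) = j := by
      rw [PySem.Chars.strip]
      have h2 : PySem.Chars.lstrip (' ' :: j) = PySem.Chars.lstrip j := by
        rw [PySem.Chars.lstrip, PySem.Chars.lstrip, List.dropWhile_cons]
        simp [show PySem.Chars.isspace ' ' = true from by decide]
      rw [h2, lstrip_of_clean hj.1, rstrip_of_clean hj.2]
    simpa using h1
  · rw [if_neg hMnil]
    apply strip_of_clean
    constructor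
    · intro c hc
      rw [List.head?_append_of_ne_nil _ hMnil] at hc
      exact hM.1 c hc
    · intro c hc
      rw [show M ++ ' ' :: j = (M ++ [' ']) ++ j from by simp] at hc
      rw [List.getLast?_append_of_ne_nil _ hjne] at hc
      exact hj.2 c hc



-- ---------- String-level bridges ----------

theorem str_split₀_eq (s : String) :
    PySem.Str.split₀ s = (PySem.Chars.split₀ s.toList).map String.ofList := rfl

theorem str_split₀_strip (s : String) :
    PySem.Str.split₀ (PySem.Str.strip s) = PySem.Str.split₀ s := by
  rw [str_split₀_eq, str_split₀_eq, PySem.Str.strip, String.toList_ofList, split_strip]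

theorem str_strip_eq_empty_iff (s : String) :
    PySem.Str.strip s = "" ↔ PySem.Str.split₀ s = [] := by
  rw [PySem.Str.strip, str_split₀_eq]
  constructor
  · intro h
    have : PySem.Chars.strip s.toList = [] := by
      have := congrArg String.toList h
      simpa using this
    rw [(split_eq_nil_iff_strip_eq_nil s.toList).mpr this]
    rfl
  · intro h
    have h1 : PySem.Chars.split₀ s.toList = [] := List.map_eq_nil_iff.mp h
    rw [(split_eq_nil_iff_strip_eq_nil s.toList).mp h1]

theorem str_join_toList (ws : List String) :
    (PySem.Str.join " " ws).toList = PySem.Chars.join [' '] (ws.map String.toList) := by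
  rw [PySem.Str.join, String.toList_ofList]
  rfl

theorem findOverlap_eq (p q : List String) : ∀ n, findOverlapA p q n = findOverlapB p q n := by
  intro n
  induction n with
  | zero => rfl
  | succ n ih => rw [findOverlapA, findOverlapB, ih]

-- ---------- the coupling invariant ----------

-- B's final rendering: base, one space, the appended words joined by single spaces
def renderS (base : String) (extra : List String) : String :=
  if extra = [] then base
  else if base = "" then PySem.Str.join " " extra
  else String.ofList (base.toList ++ ' ' :: (PySem.Str.join " " extra).toList)

def MInv (base M : String) (st : List String × List String) : Prop :=
  st.1 = (PySem.Str.split₀ M).map PySem.Str.lower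
  ∧ M = renderS base st.2
  ∧ CleanEnds M.toList
  ∧ ∀ w ∈ st.2, IsWordL w.toList


set_option maxHeartbeats 1000000 in
theorem append_inv (base M : String) (st : List String × List String) (add : List String)
    (h1 : st.1 = (PySem.Str.split₀ M).map PySem.Str.lower)
    (h2 : M = renderS base st.2)
    (h3 : CleanEnds M.toList)
    (h4 : ∀ w ∈ st.2, IsWordL w.toList)
    (hadd : add ≠ [])
    (hwords : ∀ w ∈ add.map String.toList, IsWordL w) :
    MInv base (PySem.Str.strip (String.ofList (M.toList ++ ' ' :: (PySem.Str.join " " add).toList)))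
      (st.1 ++ add.map PySem.Str.lower, st.2 ++ add) := by
  have haddne : add.map String.toList ≠ [] := by simpa using hadd
  have hJne : PySem.Chars.join [' '] (add.map String.toList) ≠ [] := join_ne_nil haddne hwords
  have hJclean : CleanEnds (PySem.Chars.join [' '] (add.map String.toList)) := clean_join hwords
  have hMt : (PySem.Str.strip (String.ofList (M.toList ++ ' ' :: (PySem.Str.join " " add).toList))).toList
      = PySem.Chars.strip (M.toList ++ ' ' :: PySem.Chars.join [' '] (add.map String.toList)) := by
    rw [PySem.Str.strip, String.toList_ofList, String.toList_ofList, str_join_toList]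
  have hstripJ : PySem.Chars.strip (M.toList ++ ' ' :: PySem.Chars.join [' '] (add.map String.toList))
      = if M.toList = [] then PySem.Chars.join [' '] (add.map String.toList)
        else M.toList ++ ' ' :: PySem.Chars.join [' '] (add.map String.toList) :=
    strip_append_word h3 hJclean hJne
  have hsplit' : PySem.Chars.split₀ ((PySem.Str.strip (String.ofList (M.toList ++ ' ' :: (PySem.Str.join " " add).toList))).toList)
      = PySem.Chars.split₀ M.toList ++ add.map String.toList := by
    rw [hMt, split_strip, split_append_space M.toList _ (by decide), split_join hwords]
  refine ⟨?_, ?_, ?_, ?_⟩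
  · -- word-list component
    have e1 : PySem.Str.split₀ (PySem.Str.strip (String.ofList (M.toList ++ ' ' :: (PySem.Str.join " " add).toList)))
        = (PySem.Chars.split₀ M.toList).map String.ofList ++ add := by
      rw [str_split₀_eq, hsplit', List.map_append, List.map_map]
      rw [show (String.ofList ∘ String.toList) = id from funext (fun x => String.ofList_toList), List.map_id]
    rw [str_split₀_eq] at h1
    rw [e1, List.map_append, h1]
  · -- render component
    have hnil2 : ¬(st.2 ++ add = []) := by simp [hadd]
    have hofeq : ∀ (x y : String), x.toList = y.toList → x = y := by
      intro x y hxy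
      have := congrArg String.ofList hxy
      simpa using this
    apply hofeq
    rw [hMt, hstripJ]
    by_cases hb2 : st.2 = []
    · have hMbase : M = base := by rw [h2, hb2, renderS]; simp
      by_cases hbase : base = ""
      · rw [renderS, if_neg hnil2, if_pos hbase]
        rw [str_join_toList, hb2, List.nil_append]
        rw [if_pos (by rw [hMbase, hbase]; rfl)]
      · have hbt : ¬(M.toList = []) := by
          rw [hMbase]
          intro hcon
          exact hbase (by
            have := congrArg String.ofList hcon
            simpa using this)
        rw [if_neg hbt, renderS, if_neg hnil2, if_neg hbase, String.toList_ofList]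
        rw [str_join_toList, hb2, List.nil_append, hMbase]
    · have hwords2 : ∀ w ∈ st.2.map String.toList, IsWordL w := by
        intro w hw
        obtain ⟨w', hw', rfl⟩ := List.mem_map.mp hw
        exact h4 w' hw'
      have hJexne : PySem.Chars.join [' '] (st.2.map String.toList) ≠ [] :=
        join_ne_nil (by simpa using hb2) hwords2
      have hjoinapp : PySem.Chars.join [' '] ((st.2 ++ add).map String.toList)
          = PySem.Chars.join [' '] (st.2.map String.toList)
            ++ ' ' :: PySem.Chars.join [' '] (add.map String.toList) := by
        rw [List.map_append]
        exact join_append (by simpa using hb2) haddne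
      by_cases hbase : base = ""
      · have hMJ : M.toList = PySem.Chars.join [' '] (st.2.map String.toList) := by
          rw [h2, renderS, if_neg hb2, if_pos hbase, str_join_toList]
        rw [if_neg (by rw [hMJ]; exact hJexne)]
        rw [renderS, if_neg hnil2, if_pos hbase, str_join_toList, hjoinapp, hMJ]
      · have hMJ : M.toList = base.toList ++ ' ' :: PySem.Chars.join [' '] (st.2.map String.toList) := by
          rw [h2, renderS, if_neg hb2, if_neg hbase, String.toList_ofList, str_join_toList]
        rw [if_neg (by rw [hMJ]; simp)]
        rw [renderS, if_neg hnil2, if_neg hbase, String.toList_ofList, str_join_toList, hjoinapp, hMJ]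
        simp
  · rw [hMt]
    exact clean_strip _
  · intro w hw
    rcases List.mem_append.mp hw with h | h
    · exact h4 w h
    · have : w.toList ∈ add.map String.toList := List.mem_map_of_mem h
      exact hwords _ this

set_option maxHeartbeats 1000000 in
theorem step_inv {base M : String} {st : List String × List String} (chunk : String)
    (h : MInv base M st) : MInv base (stepA M chunk) (stepB st chunk) := by
  obtain ⟨h1, h2, h3, h4⟩ := h
  by_cases hnil : PySem.Str.split₀ chunk = []
  · have hstrip : PySem.Str.strip chunk = "" := (str_strip_eq_empty_iff chunk).mpr hnil
    rw [stepA, stepB]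
    simp only [hstrip, hnil]
    exact ⟨h1, h2, h3, h4⟩
  · have hstrip : ¬ (PySem.Str.strip chunk = "") :=
      fun hs => hnil ((str_strip_eq_empty_iff chunk).mp hs)
    rw [stepA, stepB]
    simp only [hstrip, hnil, str_split₀_strip chunk, ← h1]
    have hlen : st.1.length = (PySem.Str.split₀ M).length := by rw [h1, List.length_map]
    rw [hlen, ← findOverlap_eq]
    have hsliceA : ∀ (k : ℕ), (if k ≠ 0 then PySem.List.slice (PySem.Str.split₀ chunk) (some (k : Int)) none
        else PySem.Str.split₀ chunk) = (PySem.Str.split₀ chunk).drop k := by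
      intro k
      by_cases hk0 : k = 0
      · simp [hk0]
      · rw [if_pos hk0, PySem.List.slice_from_natCast]
    have hsliceF : ∀ (k : ℕ), PySem.List.slice (List.map PySem.Str.lower (PySem.Str.split₀ chunk)) (some (k : Int)) none
        = List.map PySem.Str.lower ((PySem.Str.split₀ chunk).drop k) := by
      intro k
      rw [PySem.List.slice_from_natCast, ← List.map_drop]
    have hsliceN : ∀ (k : ℕ), PySem.List.slice (PySem.Str.split₀ chunk) (some (k : Int)) none
        = (PySem.Str.split₀ chunk).drop k := fun k => PySem.List.slice_from_natCast _ k
    rw [hsliceA, hsliceF, hsliceN]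
    simp only [if_false]
    by_cases hadd : (PySem.Str.split₀ chunk).drop
        (findOverlapA st.1 (List.map PySem.Str.lower (PySem.Str.split₀ chunk))
          (min 24 (min (PySem.Str.split₀ M).length (PySem.Str.split₀ chunk).length))) = []
    · rw [if_neg (by simp [hadd]), if_pos hadd]
      exact ⟨h1, h2, h3, h4⟩
    · rw [if_pos (by simpa using hadd), if_neg hadd]
      refine append_inv base M st _ h1 h2 h3 h4 hadd ?_
      intro w hw
      obtain ⟨w', hw', rfl⟩ := List.mem_map.mp hw
      have hmem : w' ∈ PySem.Str.split₀ chunk := List.mem_of_mem_drop hw'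
      rw [str_split₀_eq] at hmem
      obtain ⟨w₀, hw₀, rfl⟩ := List.mem_map.mp hmem
      rw [String.toList_ofList]
      exact split_words chunk.toList w₀ hw₀

theorem fold_inv (base : String) (rest : List String) :
    ∀ (M : String) (st : List String × List String), MInv base M st →
    MInv base (List.foldl stepA M rest) (List.foldl stepB st rest) := by
  induction rest with
  | nil => intro M st h; exact h
  | cons c t ih => intro M st h; exact ih _ _ (step_inv c h)

set_option maxHeartbeats 1000000 in
theorem init_inv (c0 : String) :
    MInv (PySem.Str.strip c0) (PySem.Str.strip c0)
      ((PySem.Str.split₀ (PySem.Str.strip c0)).map PySem.Str.lower, []) := by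
  unfold MInv
  refine ⟨rfl, by simp [renderS], ?_, by simp⟩
  rw [PySem.Str.strip, String.toList_ofList]
  exact clean_strip c0.toList

-- ===== VERDICT (by name: the statement is the Claim_ definition above) =====
theorem merge_translated_chunks_py_spec : Claim_equal_merge_translated_chunks_py := by
  intro chunks _
  unfold Spec_merge_translated_chunks_py
  match chunks with
  | [] => rfl
  | c0 :: rest =>
      have hinv := fold_inv (PySem.Str.strip c0) rest _ _ (init_inv c0)
      obtain ⟨h1, h2, h3, h4⟩ := hinv
      rw [merge_translated_chunks_py, merge_translated_chunks_py_alt]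
      have hstrip : PySem.Str.strip (List.foldl stepA (PySem.Str.strip c0) rest)
          = List.foldl stepA (PySem.Str.strip c0) rest := by
        rw [PySem.Str.strip, strip_of_clean h3, String.ofList_toList]
      rw [hstrip, h2]
      rw [str_split₀_strip c0]
      rfl
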